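-- pv_equiv track=rewrite | github.com/trainrex42/Advent-of-Code-2017 | 03/solve2.py | get_bigger
-- ===== SOURCE A (Python) =====
-- def get_bigger(num):
--     grid = {str([0,0]):1,str([1,0]):1}
--
--     x = 1
--     y = 0
--     dx = 0
--     dy = 1
--     layer = False
--
--     while grid[str([x,y])] <= num:
--         x += dx
--         y += dy
--
--         if abs(x) == abs(y):
--             if x > 0 and y > 0:
--                 dx = -1
--                 dy = 0
--             elif x < 0 and y > 0:
--                 dx = 0
--                 dy = -1
--             elif x < 0 and y < 0:
--                 dx = 1
--                 dy = 0
--             else: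
--                 layer = True
--         elif layer:
--             dx = 0
--             dy = 1
--             layer = False
--
--         nxt = 0
--
--         check = [[x,y+1],[x+1,y+1],[x+1,y],[x+1,y-1],[x,y-1],[x-1,y-1],[x-1,y],[x-1,y+1]]
--         for look in check:
--             if str(look) in grid:
--                 nxt += grid[str(look)]
--
--         grid[str([x,y])] = nxt
--
--     return grid[str([x,y])]
-- ===== SOURCE B (Python) =====
-- def get_bigger(num):
--     # Closed-form bijection between spiral index and coordinates: values live in a
--     # flat list indexed by spiral index; neighbor lookup is pure arithmetic, no dict.
--     def idx(x, y):
--         r = max(abs(x), abs(y))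
--         if r == 0:
--             return 0
--         s = (2 * r - 1) ** 2
--         if x == r and y > -r:
--             return s + (y + r - 1)
--         if y == r:
--             return s + 2 * r + (r - 1 - x)
--         if x == -r:
--             return s + 4 * r + (r - 1 - y)
--         return s + 6 * r + (x + r - 1)
--
--     vals = [1]
--     n = 0
--     r = 0
--     while True:
--         n += 1
--         if n == (2 * r + 1) ** 2:
--             r += 1
--         m = n - (2 * r - 1) ** 2
--         side, off = divmod(m, 2 * r)
--         if side == 0:
--             x, y = r, off - r + 1
--         elif side == 1:
--             x, y = r - 1 - off, r
--         elif side == 2: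
--             x, y = -r, r - 1 - off
--         else:
--             x, y = off - r + 1, -r
--         v = 0
--         for nx, ny in ((x-1,y-1),(x-1,y),(x-1,y+1),(x,y-1),(x,y+1),(x+1,y-1),(x+1,y),(x+1,y+1)):
--             j = idx(nx, ny)
--             if j < n:
--                 v += vals[j]
--         vals.append(v)
--         if v > num:
--             return v
-- ===== Notes on version B (the rewrite author's own statement) =====
-- stated objective: alternative
-- what changed: Replaces A's dictionary-of-visited-cells walk with direction/corner state by a flat list of values indexed by spiral index, using a closed-form bijection between spiral index and coordinates (ring arithmetic) both to place each new cell and to look up its neighbours arithmetically, so no dict and no direction bookkeeping remain.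
import Mathlib
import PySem

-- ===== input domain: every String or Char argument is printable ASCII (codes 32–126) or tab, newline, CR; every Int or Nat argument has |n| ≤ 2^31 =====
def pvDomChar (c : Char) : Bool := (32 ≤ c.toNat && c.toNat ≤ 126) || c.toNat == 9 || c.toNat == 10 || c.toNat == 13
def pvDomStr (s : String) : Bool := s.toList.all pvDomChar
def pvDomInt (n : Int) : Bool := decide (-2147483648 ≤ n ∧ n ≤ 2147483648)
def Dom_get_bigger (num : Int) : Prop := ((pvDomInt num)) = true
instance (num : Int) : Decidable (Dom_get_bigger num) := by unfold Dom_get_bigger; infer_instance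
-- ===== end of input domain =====

set_option maxRecDepth 100000
set_option maxHeartbeats 2000000


-- B drops A's walked grid dictionary and direction state entirely: values live in a flat
-- list indexed by spiral index, coordinates come from a closed-form index→(x,y) formula and
-- neighbours are looked up through the inverse (x,y)→index formula; objective: alternative.
-- Within |num| ≤ 2^31 both loops exit after at most 145 iterations, so the fuel (150/151)
-- in the ports never runs out on the stated domain.
-- A's dict is keyed by str([x,y]); str is injective on these two-element int lists, so the
-- port keys the dict by the pair (x,y) itself — membership and lookup behave identically.

-- ===== PORT A =====
-- state: (grid, x, y, dx, dy, layer)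
abbrev StA := PySem.Dict (Int × Int) Int × Int × Int × Int × Int × Bool

-- loop body of A's while-loop, step for step
def stepA (s : StA) : StA :=
  match s with
  | (grid, x, y, dx, dy, layer) =>
    let x := x + dx
    let y := y + dy
    let (dx, dy, layer) :=
      if x.natAbs = y.natAbs then
        if x > 0 ∧ y > 0 then ((-1 : Int), (0 : Int), layer)
        else if x < 0 ∧ y > 0 then (0, -1, layer)
        else if x < 0 ∧ y < 0 then (1, 0, layer)
        else (dx, dy, true)
      else if layer then (0, 1, false)
      else (dx, dy, layer)
    let check : List (Int × Int) :=
      [(x, y+1), (x+1, y+1), (x+1, y), (x+1, y-1), (x, y-1), (x-1, y-1), (x-1, y), (x-1, y+1)]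
    let nxt := check.foldl (fun nxt look =>
      match grid.get? look with
      | some v => nxt + v
      | none => nxt) 0
    (grid.insert (x, y) nxt, x, y, dx, dy, layer)

-- grid[str([x,y])]: the key is always present when A reads it, so getD's default is never used
def curA (s : StA) : Int := s.1.getD (s.2.1, s.2.2.1) 0

-- the while-loop; fuel 150 suffices for every |num| ≤ 2^31 (at most 145 iterations happen)
def loopA (num : Int) : Nat → StA → Int
  | 0, s => curA s
  | f+1, s => if curA s ≤ num then loopA num f (stepA s) else curA s

def get_bigger (num : Int) : Int :=
  loopA num 150 (PySem.Dict.ofList [(((0:Int), (0:Int)), (1:Int)), ((1, 0), 1)], 1, 0, 0, 1, false)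

-- ===== PORT B =====
-- Source B's idx(x, y): spiral index of the cell at (x, y), pure arithmetic
def idxB (x y : Int) : Int :=
  let r := max (if x < 0 then -x else x) (if y < 0 then -y else y)  -- max(abs(x), abs(y))
  if r = 0 then 0
  else
    let s := (2*r - 1)^2
    if x = r ∧ y > -r then s + (y + r - 1)
    else if y = r then s + 2*r + (r - 1 - x)
    else if x = -r then s + 4*r + (r - 1 - y)
    else s + 6*r + (x + r - 1)

-- state: (vals, n, r); body of Source B's while True loop, returning (new state, appended value v)
def stepB (st : List Int × Int × Int) : (List Int × Int × Int) × Int :=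
  match st with
  | (vals, n, r) =>
    let n := n + 1
    let r := if n = (2*r + 1)^2 then r + 1 else r
    let m := n - (2*r - 1)^2
    -- divmod(m, 2*r): here n ≥ 1 forces r ≥ 1, so the divisor is nonzero and getD's default is never used
    let so := (PySem.Int.divmod? m (2*r)).getD (0, 0)
    let side := so.1
    let off := so.2
    let xy : Int × Int :=
      if side = 0 then (r, off - r + 1)
      else if side = 1 then (r - 1 - off, r)
      else if side = 2 then (-r, r - 1 - off)
      else (off - r + 1, -r)
    let x := xy.1
    let y := xy.2
    -- vals[j] under the guard j < n = len(vals): pyGet? is some there, getD's default never used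
    let v := ([(x-1,y-1), (x-1,y), (x-1,y+1), (x,y-1), (x,y+1), (x+1,y-1), (x+1,y), (x+1,y+1)] : List (Int × Int)).foldl
      (fun acc p =>
        let j := idxB p.1 p.2
        if j < n then acc + (PySem.List.pyGet? vals j).getD 0 else acc) 0
    ((vals ++ [v], n, r), v)

-- the while True loop: compute this cell's value, return it once it exceeds num;
-- fuel 151 suffices on the stated domain (at most 145 iterations happen)
def loopB (num : Int) : Nat → List Int × Int × Int → Int
  | 0, _ => 0
  | f+1, st =>
    let sv := stepB st
    if sv.2 > num then sv.2 else loopB num f sv.1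

def get_bigger_alt (num : Int) : Int := loopB num 151 ([1], 0, 0)

-- ===== PRECONDITION & SPEC =====
def Spec_get_bigger (num : Int) (out : Int) : Prop := out = get_bigger_alt num
instance (num : Int) (out : Int) : Decidable (Spec_get_bigger num out) := by unfold Spec_get_bigger; infer_instance

-- ===== CLAIM (what is proved, stated in full; the proofs are below) =====
def Claim_equal_get_bigger : Prop := ∀ (num : Int), Dom_get_bigger num → Spec_get_bigger num (get_bigger num)

-- ===== LEMMAS AND PROOFS =====

-- first element of the list strictly greater than num; d is the fallback once the list is exhausted
def pick (num : Int) : List Int → Int → Int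
  | [], d => d
  | v :: vs, _ => if num < v then v else pick num vs v

-- the sequence of cell values A's loop inspects (num-independent)
def valsA : Nat → StA → List Int
  | 0, _ => []
  | f+1, s => curA s :: valsA f (stepA s)

-- the sequence of cell values B's loop appends (num-independent)
def traceB : Nat → List Int × Int × Int → List Int
  | 0, _ => []
  | f+1, st => (stepB st).2 :: traceB f (stepB st).1

lemma pick_ne_nil (num : Int) (l : List Int) (h : l ≠ []) (d d' : Int) :
    pick num l d = pick num l d' := by
  cases l with
  | nil => exact absurd rfl h
  | cons v vs => rfl

lemma loopA_eq_pick (num : Int) : ∀ (f : Nat) (s : StA) (d : Int),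
    loopA num f s = pick num (valsA (f+1) s) d := by
  intro f
  induction f with
  | zero => intro s d; simp [loopA, valsA, pick]
  | succ f ih =>
    intro s d
    show (if curA s ≤ num then loopA num f (stepA s) else curA s)
        = pick num (curA s :: valsA (f+1) (stepA s)) d
    by_cases h : num < curA s
    · simp [pick, h, not_le.mpr h]
    · simp [pick, h, not_lt.mp h, ih (stepA s) (curA s)]

lemma loopB_eq_pick (num : Int) : ∀ (f : Nat) (st : List Int × Int × Int),
    (∃ v ∈ traceB f st, num < v) → loopB num f st = pick num (traceB f st) 0 := by
  intro f
  induction f with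
  | zero => rintro st ⟨v, hv, _⟩; simp [traceB] at hv
  | succ f ih =>
    rintro st ⟨v, hv, hnum⟩
    show (if (stepB st).2 > num then (stepB st).2 else loopB num f (stepB st).1)
        = pick num ((stepB st).2 :: traceB f (stepB st).1) 0
    by_cases h : num < (stepB st).2
    · simp [pick, h]
    · have hv' : v ∈ traceB f (stepB st).1 := by
        rcases List.mem_cons.mp (by simpa [traceB] using hv) with he | hm
        · exact absurd (he ▸ hnum) h
        · exact hm
      have hne : traceB f (stepB st).1 ≠ [] := List.ne_nil_of_mem hv'
      simp [pick, h, ih (stepB st).1 ⟨v, hv', hnum⟩, pick_ne_nil num _ hne 0 ((stepB st).2)]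

-- the two schemes visit the same cells in the same order: identical 151-value sequences
lemma trace_eq :
    valsA 151 (PySem.Dict.ofList [(((0:Int), (0:Int)), (1:Int)), ((1, 0), 1)], 1, 0, 0, 1, false)
      = traceB 151 ([1], 0, 0) := by
  decide

-- the 145th value exceeds 2^31, so within the domain pick never reaches its fallback
lemma big_mem : ((3813299996 : Int)) ∈ traceB 151 ([1], 0, 0) := by decide

-- ===== VERDICT (by name: the statement is the Claim_ definition above) =====
theorem get_bigger_spec : Claim_equal_get_bigger := by
  intro num hdom
  show get_bigger num = get_bigger_alt num
  have hle : num ≤ 2147483648 := by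
    simp [Dom_get_bigger, pvDomInt] at hdom
    exact hdom.2
  have hex : ∃ v ∈ traceB 151 ([1], 0, 0), num < v :=
    ⟨3813299996, big_mem, by omega⟩
  unfold get_bigger get_bigger_alt
  rw [loopA_eq_pick num 150 _ 0, loopB_eq_pick num 151 _ hex, trace_eq]
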